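-- pv_equiv track=rewrite | github.com/miliar/Code_Jam_Webscraper | solutions_python/solutions_year16_round0_nr3/2366.py | generate
-- ===== SOURCE A (Python) =====
-- def generate(N, i):
--     a2 = (1 << (N - 1)) + 1 + (i << 1)
--     arr = [0] * N
--     for k in range(N):
--         a2, arr[k] = a2 // 2, a2 % 2
--     ans = []
--     for j in range(2, 11):
--         num = 0
--         for k in range(N - 1, -1, -1):
--             num *= j
--             num += arr[k]
--         ans.append(num)
--     return ans
-- ===== SOURCE B (Python) =====
-- def generate(N, i):
--     m = (1 << (N - 1)) + 1 + (i << 1)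
--     positions = [k for k in range(N) if (m >> k) & 1]
--     return [sum(j ** p for p in positions) for j in range(2, 11)]
-- ===== Notes on version B (the rewrite author's own statement) =====
-- stated objective: alternative
-- what changed: B extracts the set-bit positions of a2 once by shifting and computes each base's value as a sum of powers j**p over those positions, replacing A's nine per-base Horner loops over all N digits of a preassembled digit array.
import Mathlib
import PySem

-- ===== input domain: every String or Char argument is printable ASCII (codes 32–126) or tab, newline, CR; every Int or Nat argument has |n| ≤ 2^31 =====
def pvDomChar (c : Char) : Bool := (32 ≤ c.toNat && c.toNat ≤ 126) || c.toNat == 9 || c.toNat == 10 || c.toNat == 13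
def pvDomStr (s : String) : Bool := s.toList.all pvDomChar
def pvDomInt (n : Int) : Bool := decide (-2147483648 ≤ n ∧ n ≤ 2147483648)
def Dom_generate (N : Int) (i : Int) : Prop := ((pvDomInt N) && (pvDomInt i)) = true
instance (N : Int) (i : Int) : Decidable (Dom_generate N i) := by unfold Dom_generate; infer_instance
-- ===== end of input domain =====

-- B replaces A's per-base Horner loop over all N digits with a power-sum over the set-bit
-- positions extracted once by shifting (objective: alternative algorithm; digits are read once,
-- not once per base).

-- ===== PORT A =====
-- the loop 'for k in range(N): a2, arr[k] = a2 // 2, a2 % 2'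
def genDigits : Int → Nat → List Int
  | _, 0 => []
  | a2, n+1 => PySem.Int.mod a2 2 :: genDigits (PySem.Int.floordiv a2 2) n

def generate (N : Int) (i : Int) : List Int :=
  let a2 : Int := (1 : Int) <<< (N - 1).toNat + 1 + (i <<< (1 : Nat))
  let arr := genDigits a2 N.toNat
  (PySem.List.pyRange 2 11 1).map (fun j =>
    arr.reverse.foldl (fun num d => num * j + d) 0)

-- ===== PORT B =====
def generate_alt (N : Int) (i : Int) : List Int :=
  let m : Int := (1 : Int) <<< (N - 1).toNat + 1 + (i <<< (1 : Nat))
  let positions := (PySem.List.pyRange 0 N 1).filter (fun k => PySem.Int.band (m >>> k.toNat) 1 == 1)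
  (PySem.List.pyRange 2 11 1).map (fun j => (positions.map (fun p => j ^ p.toNat)).sum)

-- ===== PRECONDITION & SPEC =====
-- Pre_: for N ≤ 0 Python A raises ValueError on '1 << (N - 1)' (negative shift count)
def Pre_generate (N : Int) (i : Int) : Prop := 1 ≤ N
instance (N : Int) (i : Int) : Decidable (Pre_generate N i) := by unfold Pre_generate; infer_instance
def pvWitness_generate : Int × Int := (3, 1)

def Spec_generate (N : Int) (i : Int) (out : List Int) : Prop := out = generate_alt N i
instance (N : Int) (i : Int) (out : List Int) : Decidable (Spec_generate N i out) := by unfold Spec_generate; infer_instance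

-- ===== CLAIM (what is proved, stated in full; the proofs are below) =====
def Claim_equal_generate : Prop := ∀ (N : Int) (i : Int), Dom_generate N i → Pre_generate N i → Spec_generate N i (generate N i)

-- ===== LEMMAS AND PROOFS =====

lemma shiftRight_succ_floordiv (a : Int) (k : Nat) :
    a >>> (k + 1) = (PySem.Int.floordiv a 2) >>> k := by
  simp only [Int.shiftRight_eq_div_pow, PySem.Int.floordiv,
    show Int.fdiv a 2 = a / 2 by rw [Int.fdiv_eq_ediv]; simp]
  rw [Int.ediv_ediv_of_nonneg (by norm_num : (0:Int) ≤ 2)]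
  congr 1; push_cast; ring

-- Horner over A's digit list = B's sum of powers over the set-bit positions
lemma horner_eq_bitsum (n : Nat) (a j : Int) :
    (genDigits a n).reverse.foldl (fun num d => num * j + d) 0
      = (((List.range n).filter (fun k : Nat => PySem.Int.band (a >>> k) 1 == 1)).map
          (fun p : Nat => j ^ p)).sum := by
  induction n generalizing a with
  | zero => simp [genDigits]
  | succ n ih =>
    have hmod : PySem.Int.mod a 2 = 0 ∨ PySem.Int.mod a 2 = 1 := by
      have h1 := PySem.Int.mod_nonneg a (b := 2) (by norm_num)
      have h2 := PySem.Int.mod_lt a (b := 2) (by norm_num)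
      omega
    have hshift : (fun k : Nat => PySem.Int.band (a >>> k) 1 == 1) ∘ Nat.succ
        = fun k : Nat => PySem.Int.band ((PySem.Int.floordiv a 2) >>> k) 1 == 1 := by
      funext k
      simp [Function.comp, Nat.succ_eq_add_one, shiftRight_succ_floordiv]
    have lhs :
        (genDigits a (n+1)).reverse.foldl (fun num d => num * j + d) 0
          = ((genDigits (PySem.Int.floordiv a 2) n).reverse.foldl
              (fun num d => num * j + d) 0) * j + PySem.Int.mod a 2 := by
      simp [genDigits, List.foldl_append]
    rw [lhs, ih, List.range_succ_eq_map, List.filter_cons, List.filter_map, hshift]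
    have hmaps : ∀ l : List Nat,
        (List.map (fun p : Nat => j ^ p) (List.map Nat.succ l)).sum
          = j * (List.map (fun p : Nat => j ^ p) l).sum := by
      intro l
      rw [List.map_map]
      have hc : ((fun p : Nat => j ^ p) ∘ Nat.succ) = fun p : Nat => j * j ^ p := by
        funext p; simp [pow_succ, mul_comm]
      rw [hc, List.sum_map_mul_left]
    rcases hmod with h | h
    · rw [if_neg (by simp only [Int.shiftRight_zero, PySem.Int.band_one, h]; norm_num)]
      rw [hmaps, h]; ring
    · rw [if_pos (by simp only [Int.shiftRight_zero, PySem.Int.band_one, h]; norm_num)]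
      simp only [List.map_cons, List.sum_cons, hmaps, h, pow_zero]
      ring

-- ===== VERDICT (by name: the statement is the Claim_ definition above) =====
theorem generate_spec : Claim_equal_generate := by
  intro N i _ _
  unfold Spec_generate generate generate_alt
  apply List.map_congr_left
  intro j _
  rw [PySem.List.pyRange_zero, List.filter_map, List.map_map]
  rw [horner_eq_bitsum N.toNat ((1 : Int) <<< (N - 1).toNat + 1 + (i <<< (1 : Nat))) j]
  simp only [Function.comp_def, Int.toNat_natCast, Int.shiftRight_natCast_right]
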